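-- pv_equiv track=rewrite | github.com/alavyap/A2Z-DSA-Python | DynamicProgramming/2D_3D_DP/NinjaTraining.py | TrainNinja
-- ===== SOURCE A (Python) =====
-- def TrainNinja(n,points):
--     prev = [0] *4
--     prev[0] = max(points[0][1],points[0][2])
--     prev[1] = max(points[0][0],points[0][2])
--     prev[2] = max(points[0][0],points[0][1])
--     prev[3] = max(points[0][0],max(points[0][1],points[0][2]))
--
--     for day in range (1,n):
--
--         temp = [0] * 4
--         for last in range (4):
--             temp[last] = 0
--
--             for task in range (3):
--                 if task != last:
--                     activity = points[day][task] + prev[task]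
--                     temp[last] = max(temp[last],activity)
--         prev = temp
--     return prev[3]
-- ===== SOURCE B (Python) =====
-- def TrainNinja(n, points):
--     memo = {}
--
--     def rec(day, last):
--         key = (day, last)
--         if key in memo:
--             return memo[key]
--         if day <= 0:
--             best = max(points[0][t] for t in range(3) if t != last)
--         else:
--             best = 0
--             for t in range(3):
--                 if t != last:
--                     best = max(best, points[day][t] + rec(day - 1, t))
--         memo[key] = best
--         return best
--
--     return rec(n - 1, 3)
-- ===== Notes on version B (the rewrite author's own statement) =====
-- stated objective: alternative
-- what changed: Replaces A's bottom-up 4-slot table iteration by a top-down memoized recursion rec(day,last) keyed on (day,last), recovering the answer as rec(n-1,3).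
import Mathlib
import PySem

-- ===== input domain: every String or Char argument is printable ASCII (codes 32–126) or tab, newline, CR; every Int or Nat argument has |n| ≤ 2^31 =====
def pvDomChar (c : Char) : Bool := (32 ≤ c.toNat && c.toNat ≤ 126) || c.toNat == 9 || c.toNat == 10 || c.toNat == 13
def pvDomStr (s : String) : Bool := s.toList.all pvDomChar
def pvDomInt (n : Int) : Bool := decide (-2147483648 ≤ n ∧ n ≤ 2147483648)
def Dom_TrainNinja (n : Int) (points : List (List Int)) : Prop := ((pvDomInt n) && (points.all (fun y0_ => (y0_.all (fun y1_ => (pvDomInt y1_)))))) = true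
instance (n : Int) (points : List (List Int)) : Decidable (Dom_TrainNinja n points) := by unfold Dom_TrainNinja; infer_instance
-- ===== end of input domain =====

-- B replaces A's bottom-up 4-slot DP table by a top-down memoized recursion rec(day,last);
-- same return value wherever Pre_ holds (n ≥ 1 and the first n rows have ≥ 3 entries).

-- ===== PORT A =====
-- literal transliteration of A: 4-slot prev table, for day in range(1,n),
-- for last in range(4), inner for task in range(3) accumulating from 0.
def TrainNinja (n : Int) (points : List (List Int)) : Int :=
  let g : List Int → Int → Int := fun l i => PySem.List.pyGetD l i 0
  let p0 := PySem.List.pyGetD points 0 []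
  let prev0 : List Int :=
    [max (g p0 1) (g p0 2), max (g p0 0) (g p0 2),
     max (g p0 0) (g p0 1), max (g p0 0) (max (g p0 1) (g p0 2))]
  let prev := (PySem.List.pyRange 1 n 1).foldl (fun prev day =>
      (PySem.List.pyRange 0 4 1).foldl (fun temp last =>
          temp.set last.toNat ((PySem.List.pyRange 0 3 1).foldl (fun acc task =>
              if task ≠ last then
                max acc (g (PySem.List.pyGetD points day []) task + g prev task)
              else acc) 0)) [0, 0, 0, 0]) prev0
  g prev 3

-- ===== PORT B =====
-- literal transliteration of B (Source B): top-down recursion rec(day,last); the memo dict of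
-- Source B is pure caching and is dropped; day runs as a Nat via (n-1).toNat, so Source B's
-- 'day <= 0' base case is exactly the Nat-zero case.
def TrainNinja_altRec (points : List (List Int)) : Nat → Int → Int
  | 0, last =>
      -- max(points[0][t] for t in range(3) if t != last)
      match ([0, 1, 2].filter (fun t : Int => t ≠ last)).map
          (fun t => PySem.List.pyGetD (PySem.List.pyGetD points 0 []) t 0) with
      | [] => 0   -- unreachable: last ∈ {0,1,2,3} leaves ≥ 2 tasks
      | x :: xs => xs.foldl max x
  | d + 1, last =>
      -- best = 0; for t in range(3): if t != last: best = max(best, points[day][t] + rec(day-1, t))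
      ([0, 1, 2] : List Int).foldl (fun best t =>
        if t ≠ last then
          max best (PySem.List.pyGetD (PySem.List.pyGetD points ((d : Int) + 1) []) t 0 +
            TrainNinja_altRec points d t)
        else best) 0

def TrainNinja_alt (n : Int) (points : List (List Int)) : Int :=
  TrainNinja_altRec points (n - 1).toNat 3

-- ===== PRECONDITION & SPEC =====
-- exactly the inputs on which Python A returns: points[0] exists (read even when n ≤ 1),
-- rows 0 .. max(n,1)-1 exist and each has at least 3 entries.
def Pre_TrainNinja (n : Int) (points : List (List Int)) : Prop :=
  0 < points.length ∧ n ≤ (points.length : Int) ∧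
    ∀ l ∈ points.take (max n 1).toNat, 3 ≤ l.length
instance (n : Int) (points : List (List Int)) : Decidable (Pre_TrainNinja n points) := by
  unfold Pre_TrainNinja; infer_instance

def pvWitness_TrainNinja : Int × List (List Int) := (2, [[1, 2, 3], [4, 5, 6]])

def Spec_TrainNinja (n : Int) (points : List (List Int)) (out : Int) : Prop :=
  out = TrainNinja_alt n points
instance (n : Int) (points : List (List Int)) (out : Int) : Decidable (Spec_TrainNinja n points out) := by
  unfold Spec_TrainNinja; infer_instance

-- ===== CLAIM (what is proved, stated in full; the proofs are below) =====
def Claim_equal_TrainNinja : Prop := ∀ (n : Int) (points : List (List Int)),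
  Dom_TrainNinja n points → Pre_TrainNinja n points →
    Spec_TrainNinja n points (TrainNinja n points)

-- ===== LEMMAS AND PROOFS =====

-- A's one-day step on an explicit 4-slot table equals the list of B's recursive-step bodies.
lemma stepA_eval (r : List Int) (q0 q1 q2 q3 : Int) :
    (PySem.List.pyRange 0 4 1).foldl (fun temp last =>
        temp.set last.toNat ((PySem.List.pyRange 0 3 1).foldl (fun acc task =>
            if task ≠ last then
              max acc (PySem.List.pyGetD r task 0 + PySem.List.pyGetD [q0, q1, q2, q3] task 0)
            else acc) 0)) [0, 0, 0, 0] =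
      [max 0 (max (PySem.List.pyGetD r 1 0 + q1) (PySem.List.pyGetD r 2 0 + q2)),
       max 0 (max (PySem.List.pyGetD r 0 0 + q0) (PySem.List.pyGetD r 2 0 + q2)),
       max 0 (max (PySem.List.pyGetD r 0 0 + q0) (PySem.List.pyGetD r 1 0 + q1)),
       max 0 (max (PySem.List.pyGetD r 0 0 + q0)
                  (max (PySem.List.pyGetD r 1 0 + q1) (PySem.List.pyGetD r 2 0 + q2)))] := by
  have h4 : PySem.List.pyRange 0 4 1 = [0, 1, 2, 3] := by decide
  have h3 : PySem.List.pyRange 0 3 1 = [0, 1, 2] := by decide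
  have g0 : PySem.List.pyGetD [q0, q1, q2, q3] 0 0 = q0 := rfl
  have g1 : PySem.List.pyGetD [q0, q1, q2, q3] 1 0 = q1 := rfl
  have g2 : PySem.List.pyGetD [q0, q1, q2, q3] 2 0 = q2 := rfl
  have t2 : (2 : Int).toNat = 2 := rfl
  have t3 : (3 : Int).toNat = 3 := rfl
  simp only [h4, h3, List.foldl, g0, g1, g2, t2, t3]
  norm_num [List.set]

-- B's recursive step written out for each value of last (normalized max forms).
lemma altRec_succ0 (points : List (List Int)) (d : Nat) :
    TrainNinja_altRec points (d + 1) 0 =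
      max 0 (max (PySem.List.pyGetD (PySem.List.pyGetD points ((d : Int) + 1) []) 1 0 +
                    TrainNinja_altRec points d 1)
                 (PySem.List.pyGetD (PySem.List.pyGetD points ((d : Int) + 1) []) 2 0 +
                    TrainNinja_altRec points d 2)) := by
  simp only [TrainNinja_altRec, List.foldl]
  norm_num

lemma altRec_succ1 (points : List (List Int)) (d : Nat) :
    TrainNinja_altRec points (d + 1) 1 =
      max 0 (max (PySem.List.pyGetD (PySem.List.pyGetD points ((d : Int) + 1) []) 0 0 +
                    TrainNinja_altRec points d 0)
                 (PySem.List.pyGetD (PySem.List.pyGetD points ((d : Int) + 1) []) 2 0 +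
                    TrainNinja_altRec points d 2)) := by
  simp only [TrainNinja_altRec, List.foldl]
  norm_num

lemma altRec_succ2 (points : List (List Int)) (d : Nat) :
    TrainNinja_altRec points (d + 1) 2 =
      max 0 (max (PySem.List.pyGetD (PySem.List.pyGetD points ((d : Int) + 1) []) 0 0 +
                    TrainNinja_altRec points d 0)
                 (PySem.List.pyGetD (PySem.List.pyGetD points ((d : Int) + 1) []) 1 0 +
                    TrainNinja_altRec points d 1)) := by
  simp only [TrainNinja_altRec, List.foldl]
  norm_num

lemma altRec_succ3 (points : List (List Int)) (d : Nat) :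
    TrainNinja_altRec points (d + 1) 3 =
      max 0 (max (PySem.List.pyGetD (PySem.List.pyGetD points ((d : Int) + 1) []) 0 0 +
                    TrainNinja_altRec points d 0)
                 (max (PySem.List.pyGetD (PySem.List.pyGetD points ((d : Int) + 1) []) 1 0 +
                        TrainNinja_altRec points d 1)
                      (PySem.List.pyGetD (PySem.List.pyGetD points ((d : Int) + 1) []) 2 0 +
                        TrainNinja_altRec points d 2))) := by
  simp only [TrainNinja_altRec, List.foldl]
  norm_num

-- invariant: A's table after folding days 1..k is [rec k 0, rec k 1, rec k 2, rec k 3].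
lemma fold_rel (points : List (List Int)) (k : Nat) :
    (PySem.List.pyRange 1 ((k : Int) + 1) 1).foldl (fun prev day =>
        (PySem.List.pyRange 0 4 1).foldl (fun temp last =>
            temp.set last.toNat ((PySem.List.pyRange 0 3 1).foldl (fun acc task =>
                if task ≠ last then
                  max acc (PySem.List.pyGetD (PySem.List.pyGetD points day []) task 0 +
                    PySem.List.pyGetD prev task 0)
                else acc) 0)) [0, 0, 0, 0])
      [TrainNinja_altRec points 0 0, TrainNinja_altRec points 0 1,
       TrainNinja_altRec points 0 2, TrainNinja_altRec points 0 3] =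
      [TrainNinja_altRec points k 0, TrainNinja_altRec points k 1,
       TrainNinja_altRec points k 2, TrainNinja_altRec points k 3] := by
  induction k with
  | zero =>
    rw [show ((0 : Nat) : Int) + 1 = 1 from by norm_num,
        PySem.List.pyRange_one_eq_nil le_rfl]
    rfl
  | succ d ih =>
    push_cast
    rw [PySem.List.pyRange_one_succ_right (by omega), List.foldl_append, ih]
    simp only [List.foldl]
    rw [stepA_eval]
    rw [← altRec_succ0, ← altRec_succ1, ← altRec_succ2, ← altRec_succ3]

-- ===== VERDICT (by name: the statement is the Claim_ definition above) =====
theorem TrainNinja_spec : Claim_equal_TrainNinja := by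
  intro n points _ _
  show TrainNinja n points = TrainNinja_alt n points
  by_cases hn : n ≤ 0
  · -- the day loop is empty and B's day (n-1).toNat is 0: both read only points[0]
    unfold TrainNinja TrainNinja_alt
    rw [show (n - 1).toNat = 0 from by omega,
        PySem.List.pyRange_one_eq_nil (by omega : n ≤ 1)]
    simp only [List.foldl]
    rw [show ∀ a b c d : Int, PySem.List.pyGetD [a, b, c, d] 3 0 = d from fun _ _ _ _ => rfl]
    simp [TrainNinja_altRec]
  · obtain ⟨k, hk⟩ : ∃ k : Nat, n = (k : Int) + 1 := ⟨(n - 1).toNat, by omega⟩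
    unfold TrainNinja TrainNinja_alt
    simp only []
    rw [hk]
    have hbase0 : max (PySem.List.pyGetD (PySem.List.pyGetD points 0 []) 1 0)
        (PySem.List.pyGetD (PySem.List.pyGetD points 0 []) 2 0) = TrainNinja_altRec points 0 0 := by
      simp [TrainNinja_altRec]
    have hbase1 : max (PySem.List.pyGetD (PySem.List.pyGetD points 0 []) 0 0)
        (PySem.List.pyGetD (PySem.List.pyGetD points 0 []) 2 0) = TrainNinja_altRec points 0 1 := by
      simp [TrainNinja_altRec]
    have hbase2 : max (PySem.List.pyGetD (PySem.List.pyGetD points 0 []) 0 0)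
        (PySem.List.pyGetD (PySem.List.pyGetD points 0 []) 1 0) = TrainNinja_altRec points 0 2 := by
      simp [TrainNinja_altRec]
    have hbase3 : max (PySem.List.pyGetD (PySem.List.pyGetD points 0 []) 0 0)
        (max (PySem.List.pyGetD (PySem.List.pyGetD points 0 []) 1 0)
             (PySem.List.pyGetD (PySem.List.pyGetD points 0 []) 2 0)) = TrainNinja_altRec points 0 3 := by
      simp [TrainNinja_altRec]
    rw [hbase3, hbase2, hbase1, hbase0, fold_rel]
    have : ((k : Int) + 1 - 1).toNat = k := by omega
    rw [this]
    rfl
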